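-- pv_equiv track=rewrite | github.com/QuBenhao/LeetCode | problems/1686/solution.py | stoneGameVI
-- ===== SOURCE A (Python) =====
-- def stoneGameVI(aliceValues, bobValues):
--     """
--     :type aliceValues: List[int]
--     :type bobValues: List[int]
--     :rtype: int
--     """
--     total = [(i,aliceValues[i]+bobValues[i]) for i in range(len(aliceValues))]
--     total.sort(key=lambda x:-x[1])
--     turn = True
--     score = 0
--     while total:
--         i,_ = total.pop(0)
--         if turn:
--             score += aliceValues[i]
--             turn = False
--         else:
--             score -= bobValues[i]
--             turn = True
--
--     if score > 0:
--         return 1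
--     elif score < 0:
--         return -1
--     else:
--         return 0
-- ===== SOURCE B (Python) =====
-- def stoneGameVI(aliceValues, bobValues):
--     # Descending value list of combined worths; alice's picked stones are the
--     # even positions of any descending order, and
--     # alice_total - bob_total = sum(picked combined) - sum(all bob values).
--     combined = sorted((x + y for x, y in zip(aliceValues, bobValues)), reverse=True)
--     score = sum(combined[::2]) - sum(y for _, y in zip(aliceValues, bobValues))
--     if score > 0:
--         return 1
--     elif score < 0:
--         return -1
--     else:
--         return 0
-- ===== Notes on version B (the rewrite author's own statement) =====
-- stated objective: faster
-- what changed: B replaces the index-sort plus alternating-turn loop with repeated pop(0) by the identity score = sum of combined values at even positions of the descending combined-value sort minus the sum of all of Bob's (zipped) values, so no indices, no turn flag and no quadratic pop(0) remain.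
import Mathlib
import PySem

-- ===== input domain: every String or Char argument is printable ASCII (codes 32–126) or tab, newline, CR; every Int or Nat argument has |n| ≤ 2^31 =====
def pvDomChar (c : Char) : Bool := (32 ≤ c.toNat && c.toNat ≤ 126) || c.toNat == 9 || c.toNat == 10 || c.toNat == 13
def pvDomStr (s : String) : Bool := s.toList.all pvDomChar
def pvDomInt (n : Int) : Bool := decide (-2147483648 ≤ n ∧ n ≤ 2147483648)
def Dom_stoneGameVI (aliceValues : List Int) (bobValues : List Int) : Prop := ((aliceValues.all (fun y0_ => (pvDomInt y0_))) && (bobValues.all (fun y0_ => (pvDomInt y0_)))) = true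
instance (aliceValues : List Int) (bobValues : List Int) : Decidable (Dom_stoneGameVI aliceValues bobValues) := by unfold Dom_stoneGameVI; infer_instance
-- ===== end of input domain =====

-- B replaces A's index sort + alternating-turn loop with repeated pop(0) (quadratic) by the identity
-- score = sum(evens of descending combined sums) - sum(Bob's zipped values); measured faster at large n.


-- ===== PORT A =====
def stoneGameVI (aliceValues : List Int) (bobValues : List Int) : Int :=
  let total : List (Int × Int) :=
    (PySem.List.pyRange 0 (aliceValues.length) 1).map
      (fun i => (i, PySem.List.pyGetD aliceValues i 0 + PySem.List.pyGetD bobValues i 0))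
  let total := PySem.List.sorted total (fun x => -x.2) false
  -- while total: i,_ = total.pop(0); alternate Alice/Bob  ≡  left fold over the sorted list
  let st := total.foldl
      (fun (st : Bool × Int) p =>
        if st.1 then (false, st.2 + PySem.List.pyGetD aliceValues p.1 0)
        else (true, st.2 - PySem.List.pyGetD bobValues p.1 0)) (true, 0)
  if st.2 > 0 then 1 else if st.2 < 0 then -1 else 0

-- ===== PORT B =====
def stoneGameVI_alt (aliceValues : List Int) (bobValues : List Int) : Int :=
  let combined := PySem.List.sorted ((aliceValues.zip bobValues).map (fun p => p.1 + p.2)) (fun x => x) true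
  let score := ((PySem.List.slice? combined none none 2).getD []).sum
               - ((aliceValues.zip bobValues).map (fun p => p.2)).sum
  if score > 0 then 1 else if score < 0 then -1 else 0

-- ===== PRECONDITION & SPEC =====
-- A reads bobValues[i] for every i < len(aliceValues): it raises IndexError when bobValues is shorter.
def Pre_stoneGameVI (aliceValues : List Int) (bobValues : List Int) : Prop :=
  aliceValues.length ≤ bobValues.length
instance (aliceValues : List Int) (bobValues : List Int) : Decidable (Pre_stoneGameVI aliceValues bobValues) := by unfold Pre_stoneGameVI; infer_instance
def pvWitness_stoneGameVI : List Int × List Int := ([1, 3], [2, 1])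

def Spec_stoneGameVI (aliceValues : List Int) (bobValues : List Int) (out : Int) : Prop := out = stoneGameVI_alt aliceValues bobValues
instance (aliceValues : List Int) (bobValues : List Int) (out : Int) : Decidable (Spec_stoneGameVI aliceValues bobValues out) := by unfold Spec_stoneGameVI; infer_instance

-- ===== CLAIM (what is proved, stated in full; the proofs are below) =====
def Claim_equal_stoneGameVI : Prop := ∀ (aliceValues : List Int) (bobValues : List Int), Dom_stoneGameVI aliceValues bobValues → Pre_stoneGameVI aliceValues bobValues → Spec_stoneGameVI aliceValues bobValues (stoneGameVI aliceValues bobValues)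
-- ===== LEMMAS AND PROOFS =====

-- elements at even / odd positions
mutual
def pvEvens {α : Type} : List α → List α
  | [] => []
  | x :: t => x :: pvOdds t
def pvOdds {α : Type} : List α → List α
  | [] => []
  | _ :: t => pvEvens t
end

lemma pv_map_evens {α β : Type} (g : α → β) :
    ∀ l : List α, (pvEvens l).map g = pvEvens (l.map g) ∧ (pvOdds l).map g = pvOdds (l.map g) := by
  intro l
  induction l with
  | nil => simp [pvEvens, pvOdds]
  | cons x t ih => exact ⟨by simp [pvEvens, ih.2], by simp [pvOdds, ih.1]⟩

lemma pv_mem_evens {α : Type} :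
    ∀ l : List α, (∀ x ∈ pvEvens l, x ∈ l) ∧ (∀ x ∈ pvOdds l, x ∈ l) := by
  intro l
  induction l with
  | nil => simp [pvEvens, pvOdds]
  | cons x t ih =>
      constructor
      · intro y hy
        rw [pvEvens] at hy
        rcases List.mem_cons.1 hy with h | h
        · exact h ▸ List.mem_cons_self
        · exact List.mem_cons_of_mem _ (ih.2 y h)
      · intro y hy
        rw [pvOdds] at hy
        exact List.mem_cons_of_mem _ (ih.1 y hy)

lemma pv_sum_split {α : Type} (g : α → Int) :
    ∀ l : List α, ((pvEvens l).map g).sum + ((pvOdds l).map g).sum = (l.map g).sum := by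
  intro l
  induction l with
  | nil => simp [pvEvens, pvOdds]
  | cons x t ih => simp [pvEvens, pvOdds]; omega

lemma pv_sum_map_sub {α : Type} (u v : α → Int) :
    ∀ l : List α, (l.map (fun x => u x - v x)).sum = (l.map u).sum - (l.map v).sum := by
  intro l
  induction l with
  | nil => simp
  | cons x t ih => simp [ih]; ring

lemma pv_fold (a b : List Int) :
    ∀ (l : List (Int × Int)) (s : Int),
      ((l.foldl (fun (st : Bool × Int) p =>
          if st.1 then (false, st.2 + PySem.List.pyGetD a p.1 0)
          else (true, st.2 - PySem.List.pyGetD b p.1 0)) (true, s)).2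
        = s + ((pvEvens l).map (fun p => PySem.List.pyGetD a p.1 0)).sum
            - ((pvOdds l).map (fun p => PySem.List.pyGetD b p.1 0)).sum)
      ∧ ((l.foldl (fun (st : Bool × Int) p =>
          if st.1 then (false, st.2 + PySem.List.pyGetD a p.1 0)
          else (true, st.2 - PySem.List.pyGetD b p.1 0)) (false, s)).2
        = s - ((pvEvens l).map (fun p => PySem.List.pyGetD b p.1 0)).sum
            + ((pvOdds l).map (fun p => PySem.List.pyGetD a p.1 0)).sum) := by
  intro l
  induction l with
  | nil => intro s; simp [pvEvens, pvOdds]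
  | cons p t ih =>
      intro s
      constructor
      · have h := (ih (s + PySem.List.pyGetD a p.1 0)).2
        simp [pvEvens, pvOdds, h]
        omega
      · have h := (ih (s - PySem.List.pyGetD b p.1 0)).1
        simp [pvEvens, pvOdds, h]
        omega

lemma pv_filterMap_two {α : Type} :
    ∀ xs : List α, List.filterMap (fun k => xs[2 * k]?) (List.range ((xs.length + 1) / 2)) = pvEvens xs
  | [] => by simp [pvEvens]
  | [x] => by simp [pvEvens, pvOdds]
  | x :: y :: t => by
      have ih := pv_filterMap_two t
      have hlen : ((x :: y :: t).length + 1) / 2 = (t.length + 1) / 2 + 1 := by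
        simp only [List.length_cons]; omega
      rw [hlen, List.range_succ_eq_map, List.filterMap_cons]
      simp only [Nat.mul_zero, List.getElem?_cons_zero, List.filterMap_map]
      have hfun : ∀ k ∈ List.range ((t.length + 1) / 2),
          ((fun k => (x :: y :: t)[2 * k]?) ∘ Nat.succ) k = (fun k => t[2 * k]?) k := by
        intro k _
        have h2 : 2 * Nat.succ k = 2 * k + 1 + 1 := by omega
        simp [h2]
      rw [List.filterMap_congr hfun, ih]
      rfl

lemma pv_slice_two (xs : List Int) :
    PySem.List.slice? xs none none 2 = some (pvEvens xs) := by
  simp only [PySem.List.slice?, PySem.List.sliceIndices]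
  norm_num
  have hc : (if 0 < xs.length then (((xs.length : Int) + 2 - 1) / 2).toNat else 0)
      = (xs.length + 1) / 2 := by
    split_ifs with h <;> omega
  rw [hc]
  have hfun : ∀ k ∈ List.range ((xs.length + 1) / 2),
      (fun k : Nat => xs[(2 * (k : Int)).toNat]?) k = (fun k => xs[2 * k]?) k := by
    intro k _
    simp only []
    rw [show ((2 * (k : Int)).toNat) = 2 * k from by omega]
  rw [List.filterMap_congr hfun, pv_filterMap_two]

lemma pv_zip_map_range (f : Int → Int → Int) :
    ∀ (a b : List Int), a.length ≤ b.length →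
      (a.zip b).map (fun p => f p.1 p.2)
        = (List.range a.length).map (fun k => f (a.getD k 0) (b.getD k 0))
  | [], _, _ => by simp
  | x :: t, [], h => by simp at h
  | x :: t, y :: s, h => by
      have ih := pv_zip_map_range f t s (by simpa using h)
      simp only [List.zip_cons_cons, List.map_cons, List.length_cons, List.range_succ_eq_map,
        List.map_map]
      refine congrArg (f x y :: ·) ?_
      rw [ih]
      exact List.map_congr_left fun k _ => by simp

lemma pv_main (a b : List Int) (h : a.length ≤ b.length) :
    stoneGameVI a b = stoneGameVI_alt a b := by
  unfold stoneGameVI stoneGameVI_alt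
  simp only []
  set total : List (Int × Int) :=
    (PySem.List.pyRange 0 (a.length : Int) 1).map
      (fun i => (i, PySem.List.pyGetD a i 0 + PySem.List.pyGetD b i 0)) with htotal
  set sp := PySem.List.sorted total (fun x => -x.2) false with hsp
  set combined := PySem.List.sorted ((a.zip b).map (fun p => p.1 + p.2)) (fun x => x) true with hcombined
  -- total as a map over List.range
  have htotal' : total = (List.range a.length).map
      (fun (k : Nat) => ((k : Int), PySem.List.pyGetD a (k : Int) 0 + PySem.List.pyGetD b (k : Int) 0)) := by
    rw [htotal, PySem.List.pyRange_zero_nat, List.map_map]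
    exact List.map_congr_left fun k _ => rfl
  -- every element of sp satisfies p.2 = a-part + b-part
  have hmem : ∀ p ∈ sp, p.2 = PySem.List.pyGetD a p.1 0 + PySem.List.pyGetD b p.1 0 := by
    intro p hp
    have hp' : p ∈ total := (PySem.List.sorted_perm total _ false).mem_iff.mp hp
    rw [htotal'] at hp'
    obtain ⟨k, _, rfl⟩ := List.mem_map.mp hp'
    rfl
  -- the b-column of total equals the zipped b-column
  have hz2 : (a.zip b).map (fun p => p.2) = (List.range a.length).map (fun k => b.getD k 0) := by
    simpa using pv_zip_map_range (fun _ y => y) a b h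
  have hbcol : total.map (fun p => PySem.List.pyGetD b p.1 0) = (a.zip b).map (fun p => p.2) := by
    rw [htotal', List.map_map, hz2]
    exact List.map_congr_left fun k _ => by simp
  -- the combined column of total equals the zipped sums
  have hzs : (a.zip b).map (fun p => p.1 + p.2)
      = (List.range a.length).map (fun k => a.getD k 0 + b.getD k 0) := by
    simpa using pv_zip_map_range (fun x y => x + y) a b h
  have hscol : total.map (fun p => p.2) = (a.zip b).map (fun p => p.1 + p.2) := by
    rw [htotal', List.map_map, hzs]
    exact List.map_congr_left fun k _ => by simp
  -- the sorted combined columns coincide (unique descending value list)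
  have hsnd : sp.map (fun p => p.2) = combined := by
    apply PySem.List.eq_of_perm_of_pairwise_le_of_injective (key := fun x : Int => -x) neg_injective
    · exact (((PySem.List.sorted_perm total _ false).map _).trans
        (hscol ▸ (PySem.List.sorted_perm _ _ true).symm))
    · exact List.pairwise_map.mpr (PySem.List.sorted_pairwise total (fun x => -x.2))
    · refine List.Pairwise.imp ?_
        (PySem.List.sorted_pairwise_rev ((a.zip b).map (fun p => p.1 + p.2)) (fun x => x))
      exact fun {x y} hxy => by omega
  -- Alice's picks, rewritten through the combined values
  have hA : ((pvEvens sp).map (fun p => PySem.List.pyGetD a p.1 0)).sum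
      = ((pvEvens sp).map (fun p => p.2)).sum
        - ((pvEvens sp).map (fun p => PySem.List.pyGetD b p.1 0)).sum := by
    have hc : (pvEvens sp).map (fun p => PySem.List.pyGetD a p.1 0)
        = (pvEvens sp).map (fun p => p.2 - PySem.List.pyGetD b p.1 0) :=
      List.map_congr_left fun p hp => by
        have := hmem p ((pv_mem_evens sp).1 p hp); omega
    rw [hc, pv_sum_map_sub]
  -- the fold computes Alice minus Bob
  have hfold := (pv_fold a b sp 0).1
  -- assemble the score equality
  have hsplit := pv_sum_split (fun p => PySem.List.pyGetD b p.1 0) sp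
  have hperm : (sp.map (fun p => PySem.List.pyGetD b p.1 0)).sum
      = ((a.zip b).map (fun p => p.2)).sum := by
    rw [((PySem.List.sorted_perm total _ false).map
      (fun p => PySem.List.pyGetD b p.1 0)).sum_eq, hbcol]
  have hslice : ((PySem.List.slice? combined none none 2).getD []).sum
      = ((pvEvens sp).map (fun p => p.2)).sum := by
    rw [pv_slice_two, Option.getD_some, ← hsnd, (pv_map_evens (fun p => p.2) sp).1]
  have hscore : (sp.foldl (fun (st : Bool × Int) p =>
        if st.1 then (false, st.2 + PySem.List.pyGetD a p.1 0)
        else (true, st.2 - PySem.List.pyGetD b p.1 0)) (true, 0)).2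
      = ((PySem.List.slice? combined none none 2).getD []).sum
        - ((a.zip b).map (fun p => p.2)).sum := by
    rw [hfold, hA, hslice]
    omega
  rw [hscore]

-- ===== VERDICT (by name: the statement is the Claim_ definition above) =====
theorem stoneGameVI_spec : Claim_equal_stoneGameVI := by
  intro a b _ hpre
  unfold Spec_stoneGameVI
  exact pv_main a b hpre
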